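-- pv_equiv track=rewrite | github.com/irajatsharmaa/static_alignment | rearrange.py | rearrange_assembly
-- ===== SOURCE A (Python) =====
-- def find_instruction_index(assembly_lines, instruction):
--     for index, line in enumerate(assembly_lines):
--         if instruction in line:
--             return index
--     return None
--
-- def rearrange_assembly(assembly_lines, branch_conditions):
--     rearranged_blocks = []
--     for condition, target in branch_conditions:
--         target_index = find_instruction_index(assembly_lines, target)
--         branch_index = find_instruction_index(assembly_lines, condition)
--
--         # Create a block of 4 instructions
--         block = ['NOP'] * 4  # Initialize with NOPs
--         if target_index is not None:
--             block[0] = assembly_lines[target_index].strip()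
--         if branch_index is not None:
--             block[-1] = assembly_lines[branch_index].strip()
--             # Fill the middle instructions if possible
--             for i in range(1, 3):
--                 if branch_index - i >= 0:
--                     block[-i-1] = assembly_lines[branch_index - i].strip()
--
--         rearranged_blocks.append(block)
--     return rearranged_blocks
-- ===== SOURCE B (Python) =====
-- def rearrange_assembly(assembly_lines, branch_conditions):
--     # Collect the distinct substrings we need, in first-mention order.
--     subs = []
--     seen = set()
--     for condition, target in branch_conditions:
--         for sub in (target, condition):
--             if sub not in seen:
--                 seen.add(sub)
--                 subs.append(sub)
--     # One pass over assembly_lines: record the first line index containing each substring.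
--     first_index = {}
--     for i, line in enumerate(assembly_lines):
--         for sub in subs:
--             if sub not in first_index and sub in line:
--                 first_index[sub] = i
--     # Assemble the blocks by pure dict lookups.
--     blocks = []
--     for condition, target in branch_conditions:
--         ti = first_index.get(target)
--         bi = first_index.get(condition)
--         block = ['NOP'] * 4
--         if ti is not None:
--             block[0] = assembly_lines[ti].strip()
--         if bi is not None:
--             block[3] = assembly_lines[bi].strip()
--             if bi - 1 >= 0:
--                 block[2] = assembly_lines[bi - 1].strip()
--             if bi - 2 >= 0:
--                 block[1] = assembly_lines[bi - 2].strip()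
--         blocks.append(block)
--     return blocks
-- ===== Notes on version B (the rewrite author's own statement) =====
-- stated objective: alternative
-- what changed: A rescans assembly_lines from the top twice per branch condition (find_instruction_index per target and per condition); B makes one enumerate pass over assembly_lines building a first-occurrence-index dict for the distinct needed substrings, then assembles each block by pure dict lookups.
import Mathlib
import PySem

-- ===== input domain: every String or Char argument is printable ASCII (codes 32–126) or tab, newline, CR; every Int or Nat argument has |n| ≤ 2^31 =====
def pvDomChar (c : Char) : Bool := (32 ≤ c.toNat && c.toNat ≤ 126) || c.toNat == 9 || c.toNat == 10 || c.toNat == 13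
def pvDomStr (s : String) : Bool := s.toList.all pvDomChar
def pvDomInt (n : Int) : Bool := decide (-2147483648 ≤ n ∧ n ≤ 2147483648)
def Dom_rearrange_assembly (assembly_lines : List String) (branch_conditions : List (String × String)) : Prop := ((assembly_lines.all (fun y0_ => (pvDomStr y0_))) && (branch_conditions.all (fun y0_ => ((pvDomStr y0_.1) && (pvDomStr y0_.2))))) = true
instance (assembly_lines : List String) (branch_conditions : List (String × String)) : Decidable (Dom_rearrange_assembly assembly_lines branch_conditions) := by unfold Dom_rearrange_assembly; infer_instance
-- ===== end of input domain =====

-- B replaces A's per-condition rescans of assembly_lines by ONE index-building pass over the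
-- lines (a dict of first-occurrence indices) followed by pure dict lookups; same return value.

-- ===== PORT A =====
-- 'for index, line in enumerate(...): if instruction in line: return index' / 'return None'
def findInstructionIndexGo (assembly_lines : List String) (instruction : String) (index : Nat) : Option Nat :=
  match assembly_lines with
  | [] => none
  | line :: rest =>
    if PySem.Str.isIn instruction line then some index
    else findInstructionIndexGo rest instruction (index + 1)

def find_instruction_index (assembly_lines : List String) (instruction : String) : Option Nat :=
  findInstructionIndexGo assembly_lines instruction 0

-- the four assignments into block = ['NOP'] * 4; the indices come from enumerate, so
-- List.getD with a dummy default is exact (always in range)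
def buildBlockA (assembly_lines : List String) (target_index branch_index : Option Nat) : List String :=
  let b0 := match target_index with
    | some ti => PySem.Str.strip (assembly_lines.getD ti "")
    | none => "NOP"
  match branch_index with
  | none => [b0, "NOP", "NOP", "NOP"]
  | some bi =>
    let b3 := PySem.Str.strip (assembly_lines.getD bi "")
    -- for i in range(1, 3): if branch_index - i >= 0 (Nat indices: i ≤ bi)
    let b2 := if 1 ≤ bi then PySem.Str.strip (assembly_lines.getD (bi - 1) "") else "NOP"
    let b1 := if 2 ≤ bi then PySem.Str.strip (assembly_lines.getD (bi - 2) "") else "NOP"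
    [b0, b1, b2, b3]

def rearrange_assembly (assembly_lines : List String) (branch_conditions : List (String × String)) : List (List String) :=
  branch_conditions.foldl (fun rearranged_blocks ct =>
    let target_index := find_instruction_index assembly_lines ct.2
    let branch_index := find_instruction_index assembly_lines ct.1
    rearranged_blocks ++ [buildBlockA assembly_lines target_index branch_index]) []

-- ===== PORT B =====
-- distinct needed substrings, first-mention order (target then condition per pair)
def collectSubs (branch_conditions : List (String × String)) : PySem.Set String :=
  branch_conditions.foldl (fun s ct => PySem.Set.add (PySem.Set.add s ct.2) ct.1) PySem.Set.empty

-- inner loop of the index-building pass: one line, all still-unassigned substrings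
def indexLineStep (subs : PySem.Set String) (d : PySem.Dict String Nat) (line : String) (i : Nat) : PySem.Dict String Nat :=
  subs.foldl (fun d sub =>
    if !(d.contains sub) && PySem.Str.isIn sub line then d.insert sub i else d) d

-- 'for i, line in enumerate(assembly_lines): ...'
def buildFirstIndex (assembly_lines : List String) (subs : PySem.Set String) (d : PySem.Dict String Nat) (i : Nat) : PySem.Dict String Nat :=
  match assembly_lines with
  | [] => d
  | line :: rest => buildFirstIndex rest subs (indexLineStep subs d line i) (i + 1)

def buildBlockB (assembly_lines : List String) (ti bi : Option Nat) : List String :=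
  let b0 := match ti with
    | some t => PySem.Str.strip (assembly_lines.getD t "")
    | none => "NOP"
  match bi with
  | none => [b0, "NOP", "NOP", "NOP"]
  | some b =>
    let b3 := PySem.Str.strip (assembly_lines.getD b "")
    let b2 := if 1 ≤ b then PySem.Str.strip (assembly_lines.getD (b - 1) "") else "NOP"
    let b1 := if 2 ≤ b then PySem.Str.strip (assembly_lines.getD (b - 2) "") else "NOP"
    [b0, b1, b2, b3]

def rearrange_assembly_alt (assembly_lines : List String) (branch_conditions : List (String × String)) : List (List String) :=
  let subs := collectSubs branch_conditions
  let first_index := buildFirstIndex assembly_lines subs PySem.Dict.empty 0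
  branch_conditions.map (fun ct =>
    buildBlockB assembly_lines (first_index.get? ct.2) (first_index.get? ct.1))

-- ===== PRECONDITION & SPEC =====
def Spec_rearrange_assembly (assembly_lines : List String) (branch_conditions : List (String × String)) (out : List (List String)) : Prop := out = rearrange_assembly_alt assembly_lines branch_conditions
instance (assembly_lines : List String) (branch_conditions : List (String × String)) (out : List (List String)) : Decidable (Spec_rearrange_assembly assembly_lines branch_conditions out) := by unfold Spec_rearrange_assembly; infer_instance

-- ===== CLAIM (what is proved, stated in full; the proofs are below) =====
def Claim_equal_rearrange_assembly : Prop := ∀ (assembly_lines : List String) (branch_conditions : List (String × String)), Dom_rearrange_assembly assembly_lines branch_conditions → Spec_rearrange_assembly assembly_lines branch_conditions (rearrange_assembly assembly_lines branch_conditions)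

-- ===== LEMMAS AND PROOFS =====

-- a foldl that only ever inserts keys drawn from l leaves get? of a key outside l unchanged
lemma get?_indexFold_of_not_mem (l : List String) (d : PySem.Dict String Nat) (line : String)
    (i : Nat) (sub : String) (h : sub ∉ l) :
    (l.foldl (fun d s => if !(d.contains s) && PySem.Str.isIn s line then d.insert s i else d) d).get? sub
      = d.get? sub := by
  induction l generalizing d with
  | nil => rfl
  | cons x xs ih =>
    simp only [List.mem_cons, not_or] at h
    simp only [List.foldl_cons]
    rw [ih _ h.2]
    split
    · exact PySem.Dict.get?_insert_of_ne _ _ h.1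
    · rfl

-- the inner pass over subs: get? of a member of subs after processing one line
lemma get?_indexLineStep (subs : List String) (d : PySem.Dict String Nat) (line : String)
    (i : Nat) (sub : String) (hn : subs.Nodup) (hm : sub ∈ subs) :
    (indexLineStep subs d line i).get? sub
      = if d.contains sub then d.get? sub
        else if PySem.Str.isIn sub line then some i else none := by
  induction subs generalizing d with
  | nil => cases hm
  | cons x xs ih =>
    simp only [List.nodup_cons] at hn
    simp only [indexLineStep, List.foldl_cons] at *
    rcases List.mem_cons.mp hm with rfl | hmem
    · -- sub is the head; the tail never touches it
      rw [get?_indexFold_of_not_mem _ _ _ _ _ hn.1]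
      by_cases hc : d.contains sub = true
      · have h1 : (!d.contains sub && PySem.Str.isIn sub line) = false := by rw [hc]; rfl
        rw [if_neg (by rw [h1]; exact Bool.false_ne_true), if_pos hc]
      · have hcf : d.contains sub = false := Bool.eq_false_iff.mpr hc
        by_cases hin : PySem.Str.isIn sub line = true
        · have h1 : (!d.contains sub && PySem.Str.isIn sub line) = true := by rw [hcf, hin]; rfl
          rw [if_pos h1, PySem.Dict.get?_insert_self, if_neg hc, if_pos hin]
        · have hinf : PySem.Str.isIn sub line = false := Bool.eq_false_iff.mpr hin
          have h1 : (!d.contains sub && PySem.Str.isIn sub line) = false := by rw [hinf, Bool.and_false]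
          rw [if_neg (by rw [h1]; exact Bool.false_ne_true), if_neg hc, if_neg hin]
          exact (PySem.Dict.get?_eq_none_iff_contains d sub).mpr hcf
    · -- sub is in the tail; the head step does not change get?/contains at sub
      have hne : sub ≠ x := fun h => hn.1 (h ▸ hmem)
      have key : (if (!d.contains x && PySem.Str.isIn x line) = true then d.insert x i else d).get? sub
          = d.get? sub := by
        split
        · exact PySem.Dict.get?_insert_of_ne _ _ hne
        · rfl
      have kc : (if (!d.contains x && PySem.Str.isIn x line) = true then d.insert x i else d).contains sub
          = d.contains sub := by
        rw [PySem.Dict.contains_eq_isSome_get?, key, ← PySem.Dict.contains_eq_isSome_get?]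
      rw [ih _ hn.2 hmem, key, kc]

-- the outer pass: get? of a member of subs equals A's linear search (from offset i)
lemma get?_buildFirstIndex (lines : List String) (subs : PySem.Set String)
    (d : PySem.Dict String Nat) (i : Nat) (sub : String) (hn : subs.Nodup) (hm : sub ∈ subs) :
    (buildFirstIndex lines subs d i).get? sub
      = if d.contains sub then d.get? sub else findInstructionIndexGo lines sub i := by
  induction lines generalizing d i with
  | nil =>
    simp only [buildFirstIndex, findInstructionIndexGo]
    by_cases hc : d.contains sub = true
    · rw [if_pos hc]
    · rw [if_neg hc]
      exact (PySem.Dict.get?_eq_none_iff_contains d sub).mpr (Bool.eq_false_iff.mpr hc)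
  | cons line rest ih =>
    simp only [buildFirstIndex, findInstructionIndexGo]
    rw [ih (indexLineStep subs d line i) (i + 1)]
    have hg := get?_indexLineStep subs d line i sub hn hm
    by_cases hc : d.contains sub = true
    · have h1 : (indexLineStep subs d line i).contains sub = true := by
        rw [PySem.Dict.contains_eq_isSome_get?, hg, if_pos hc, ← PySem.Dict.contains_eq_isSome_get?]
        exact hc
      rw [if_pos h1, hg, if_pos hc, if_pos hc]
    · by_cases hin : PySem.Str.isIn sub line = true
      · have h1 : (indexLineStep subs d line i).contains sub = true := by
          rw [PySem.Dict.contains_eq_isSome_get?, hg, if_neg hc, if_pos hin]; rfl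
        rw [if_pos h1, hg, if_neg hc, if_pos hin, if_neg hc, if_pos hin]
      · have h1 : (indexLineStep subs d line i).contains sub = false := by
          rw [PySem.Dict.contains_eq_isSome_get?, hg, if_neg hc, if_neg hin]; rfl
        rw [if_neg (Bool.eq_false_iff.mp h1), if_neg hc, if_neg hin]

-- collectSubs is Nodup (it is built with Set.add from the empty set)
lemma nodup_collectSubs (bc : List (String × String)) : (collectSubs bc).Nodup := by
  unfold collectSubs
  suffices h : ∀ s : PySem.Set String, s.Nodup →
      (bc.foldl (fun s ct => PySem.Set.add (PySem.Set.add s ct.2) ct.1) s).Nodup by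
    exact h PySem.Set.empty List.nodup_nil
  induction bc with
  | nil => intro s hs; exact hs
  | cons x xs ih =>
    intro s hs
    exact ih _ (PySem.Set.nodup_add _ _ (PySem.Set.nodup_add _ _ hs))

-- both components of every pair of bc are members of collectSubs bc
lemma mem_collectSubs (bc : List (String × String)) (ct : String × String) (h : ct ∈ bc) :
    ct.2 ∈ collectSubs bc ∧ ct.1 ∈ collectSubs bc := by
  unfold collectSubs
  suffices key : ∀ s : PySem.Set String,
      (ct.2 ∈ s ∨ ct ∈ bc) → ct.2 ∈ bc.foldl (fun s ct => PySem.Set.add (PySem.Set.add s ct.2) ct.1) s ∧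
      ((ct.1 ∈ s ∨ ct ∈ bc) → ct.1 ∈ bc.foldl (fun s ct => PySem.Set.add (PySem.Set.add s ct.2) ct.1) s) by
    exact ⟨(key PySem.Set.empty (Or.inr h)).1, (key PySem.Set.empty (Or.inr h)).2 (Or.inr h)⟩
  clear h
  induction bc with
  | nil =>
    intro s h
    constructor
    · exact h.resolve_right (by simp)
    · intro h1; exact h1.resolve_right (by simp)
  | cons x xs ih =>
    intro s h
    simp only [List.foldl_cons]
    constructor
    · apply (ih _ _).1
      rcases h with hs | hbc
      · exact Or.inl ((PySem.Set.mem_add _ _ _).mpr (Or.inl ((PySem.Set.mem_add _ _ _).mpr (Or.inl hs))))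
      · rcases List.mem_cons.mp hbc with rfl | htl
        · exact Or.inl ((PySem.Set.mem_add _ _ _).mpr (Or.inl ((PySem.Set.mem_add _ _ _).mpr (Or.inr rfl))))
        · exact Or.inr htl
    · intro h1
      refine (ih _ ?_).2 ?_
      · rcases h with hs | hbc
        · exact Or.inl ((PySem.Set.mem_add _ _ _).mpr (Or.inl ((PySem.Set.mem_add _ _ _).mpr (Or.inl hs))))
        · rcases List.mem_cons.mp hbc with rfl | htl
          · exact Or.inl ((PySem.Set.mem_add _ _ _).mpr (Or.inl ((PySem.Set.mem_add _ _ _).mpr (Or.inr rfl))))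
          · exact Or.inr htl
      · rcases h1 with hs | hbc
        · exact Or.inl ((PySem.Set.mem_add _ _ _).mpr (Or.inl ((PySem.Set.mem_add _ _ _).mpr (Or.inl hs))))
        · rcases List.mem_cons.mp hbc with rfl | htl
          · exact Or.inl ((PySem.Set.mem_add _ _ _).mpr (Or.inr rfl))
          · exact Or.inr htl

-- for any needed substring, B's dict lookup equals A's linear search
lemma get?_eq_find (lines : List String) (bc : List (String × String)) (sub : String)
    (h : sub ∈ collectSubs bc) :
    (buildFirstIndex lines (collectSubs bc) PySem.Dict.empty 0).get? sub
      = find_instruction_index lines sub := by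
  rw [get?_buildFirstIndex lines _ _ 0 sub (nodup_collectSubs bc) h]
  simp [find_instruction_index, PySem.Dict.contains_empty]

-- ===== VERDICT (by name: the statement is the Claim_ definition above) =====
theorem rearrange_assembly_spec : Claim_equal_rearrange_assembly := by
  intro assembly_lines branch_conditions _
  show rearrange_assembly assembly_lines branch_conditions = rearrange_assembly_alt assembly_lines branch_conditions
  unfold rearrange_assembly rearrange_assembly_alt
  rw [PySem.List.foldl_append_singleton_eq_map]
  apply List.map_congr_left
  intro ct hct
  obtain ⟨h2, h1⟩ := mem_collectSubs branch_conditions ct hct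
  rw [get?_eq_find assembly_lines branch_conditions ct.2 h2,
      get?_eq_find assembly_lines branch_conditions ct.1 h1]
  rfl
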